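-- pv_equiv track=rewrite | github.com/GezaLang/AoC_24 | day_10/day_10_2.py | solve
-- ===== SOURCE A (Python) =====
-- def dp_trailhead_rating(grid, r, c, rows, cols, memo):
--     """using memoized recursion."""
--     if grid[r][c] == 9:
--         return 1
--     if (r, c) in memo:
--         return memo[(r, c)]
--     count = 0
--     for dr, dc in [(-1, 0), (0, 1), (1, 0), (0, -1)]:
--         rr, cc = r + dr, c + dc
--         if 0 <= rr < rows and 0 <= cc < cols and grid[rr][cc] == grid[r][c] + 1:
--             count += dp_trailhead_rating(grid, rr, cc, rows, cols, memo)
--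
--     memo[(r, c)] = count
--     return count
--
-- def solve(grid):
--     rows, cols = len(grid), len(grid[0])
--     total_rating = 0
--     memo = {}
--     for r in range(rows):
--         for c in range(cols):
--             if grid[r][c] == 0:
--                 total_rating += dp_trailhead_rating(grid, r, c, rows, cols, memo)
--     return total_rating
-- ===== SOURCE B (Python) =====
-- def solve(grid):
--     rows, cols = len(grid), len(grid[0])
--     rating = {}
--     for r in range(rows):
--         for c in range(cols):
--             if grid[r][c] == 9:
--                 rating[(r, c)] = 1
--     for v in range(8, -1, -1):
--         for r in range(rows):
--             for c in range(cols):
--                 if grid[r][c] == v: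
--                     s = 0
--                     for dr, dc in ((-1, 0), (0, 1), (1, 0), (0, -1)):
--                         rr, cc = r + dr, c + dc
--                         if 0 <= rr < rows and 0 <= cc < cols and grid[rr][cc] == v + 1:
--                             s += rating.get((rr, cc), 0)
--                     rating[(r, c)] = s
--     total = 0
--     for r in range(rows):
--         for c in range(cols):
--             if grid[r][c] == 0:
--                 total += rating.get((r, c), 0)
--     return total
-- ===== Notes on version B (the rewrite author's own statement) =====
-- stated objective: alternative
-- what changed: Replaces A's memoized top-down recursion with bottom-up tabulation: ratings are seeded at height-9 cells and filled in strictly decreasing height order (8 down to 0), so no recursion and no memo lookup remain.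
import Mathlib
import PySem

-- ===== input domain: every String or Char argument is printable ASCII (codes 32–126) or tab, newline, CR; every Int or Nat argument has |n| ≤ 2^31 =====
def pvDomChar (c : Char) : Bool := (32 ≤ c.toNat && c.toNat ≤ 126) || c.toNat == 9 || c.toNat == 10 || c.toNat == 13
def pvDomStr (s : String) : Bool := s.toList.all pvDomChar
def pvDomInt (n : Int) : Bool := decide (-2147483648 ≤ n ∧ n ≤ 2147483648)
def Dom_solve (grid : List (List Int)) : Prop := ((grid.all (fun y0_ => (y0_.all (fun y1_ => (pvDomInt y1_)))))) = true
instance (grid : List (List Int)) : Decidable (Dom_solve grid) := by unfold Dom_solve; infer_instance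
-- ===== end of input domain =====

-- B replaces A's memoized top-down recursion by bottom-up tabulation over strictly decreasing heights; the return values are proved equal on Pre_.

-- ===== PORT A =====
def pvDirs : List (Int × Int) := [(-1, 0), (0, 1), (1, 0), (0, -1)]

-- grid[r][c]; under Pre_ every access either port makes is in bounds, so the getD defaults are never used there
def pvAt (grid : List (List Int)) (r c : Int) : Int :=
  PySem.List.pyGetD (PySem.List.pyGetD grid r []) c 0

-- fuel guard only: along the recursion the height strictly increases and stops at 9, so
-- from a height-0 start (the only calls solve makes) the depth is at most 10 (proved below)
def dpTrailheadRating (grid : List (List Int)) (rows cols : Int) :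
    Nat → Int → Int → PySem.Dict (Int × Int) Int → Int × PySem.Dict (Int × Int) Int
  | 0, _, _, memo => (0, memo)
  | fuel + 1, r, c, memo =>
    if pvAt grid r c = 9 then (1, memo)
    else
      match memo.get? (r, c) with
      | some v => (v, memo)
      | none =>
        let res := pvDirs.foldl
          (fun (s : Int × PySem.Dict (Int × Int) Int) d =>
            let rr := r + d.1
            let cc := c + d.2
            if 0 ≤ rr ∧ rr < rows ∧ 0 ≤ cc ∧ cc < cols ∧ pvAt grid rr cc = pvAt grid r c + 1 then
              let p := dpTrailheadRating grid rows cols fuel rr cc s.2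
              (s.1 + p.1, p.2)
            else s) (0, memo)
        (res.1, res.2.insert (r, c) res.1)

def solve (grid : List (List Int)) : Int :=
  let rows : Int := grid.length
  let cols : Int := (PySem.List.pyGetD grid 0 []).length
  let res := (PySem.List.pyRange 0 rows 1).foldl
    (fun (st : Int × PySem.Dict (Int × Int) Int) r =>
      (PySem.List.pyRange 0 cols 1).foldl
        (fun st c =>
          if pvAt grid r c = 0 then
            let p := dpTrailheadRating grid rows cols 10 r c st.2
            (st.1 + p.1, p.2)
          else st) st) (0, PySem.Dict.empty)
  res.1

-- ===== PORT B =====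
def solve_alt (grid : List (List Int)) : Int :=
  let rows : Int := grid.length
  let cols : Int := (PySem.List.pyGetD grid 0 []).length
  let rating0 := (PySem.List.pyRange 0 rows 1).foldl
    (fun (d : PySem.Dict (Int × Int) Int) r =>
      (PySem.List.pyRange 0 cols 1).foldl
        (fun d c => if pvAt grid r c = 9 then d.insert (r, c) 1 else d) d)
    PySem.Dict.empty
  let rating := (PySem.List.pyRange 8 (-1) (-1)).foldl
    (fun (d : PySem.Dict (Int × Int) Int) v =>
      (PySem.List.pyRange 0 rows 1).foldl
        (fun d r =>
          (PySem.List.pyRange 0 cols 1).foldl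
            (fun d c =>
              if pvAt grid r c = v then
                d.insert (r, c)
                  (pvDirs.foldl
                    (fun (s : Int) dd =>
                      let rr := r + dd.1
                      let cc := c + dd.2
                      if 0 ≤ rr ∧ rr < rows ∧ 0 ≤ cc ∧ cc < cols ∧ pvAt grid rr cc = v + 1 then
                        s + d.getD (rr, cc) 0
                      else s) 0)
              else d) d) d) rating0
  (PySem.List.pyRange 0 rows 1).foldl
    (fun (t : Int) r =>
      (PySem.List.pyRange 0 cols 1).foldl
        (fun t c => if pvAt grid r c = 0 then t + rating.getD (r, c) 0 else t) t) 0

-- ===== PRECONDITION & SPEC =====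
-- Pre_ excludes exactly the inputs on which A raises: the empty grid (IndexError on grid[0])
-- and grids in which some row is shorter than the first row (A's full scan indexes every cell
-- grid[r][c] with c < len(grid[0]), so a short row always raises IndexError; B raises there too).
def Pre_solve (grid : List (List Int)) : Prop :=
  grid ≠ [] ∧ ∀ row ∈ grid, (grid.headI).length ≤ row.length
instance (grid : List (List Int)) : Decidable (Pre_solve grid) := by unfold Pre_solve; infer_instance

def pvWitness_solve : List (List Int) := [[0, 9], [1, 2]]

def Spec_solve (grid : List (List Int)) (out : Int) : Prop := out = solve_alt grid
instance (grid : List (List Int)) (out : Int) : Decidable (Spec_solve grid out) := by unfold Spec_solve; infer_instance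

-- ===== CLAIM (what is proved, stated in full; the proofs are below) =====
def Claim_equal_solve : Prop := ∀ (grid : List (List Int)), Dom_solve grid → Pre_solve grid → Spec_solve grid (solve grid)

-- ===== LEMMAS AND PROOFS =====

-- pure (memo-free) fueled rating function: the common reference both ports are proved equal to
def pvPr (grid : List (List Int)) (rows cols : Int) : Nat → Int → Int → Int
  | 0, _, _ => 0
  | f + 1, r, c =>
    if pvAt grid r c = 9 then 1
    else (pvDirs.map (fun d =>
      if 0 ≤ r + d.1 ∧ r + d.1 < rows ∧ 0 ≤ c + d.2 ∧ c + d.2 < cols ∧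
          pvAt grid (r + d.1) (c + d.2) = pvAt grid r c + 1
      then pvPr grid rows cols f (r + d.1) (c + d.2) else 0)).sum

def pvPR (grid : List (List Int)) (rows cols r c : Int) : Int :=
  pvPr grid rows cols 10 r c

lemma pvPr_succ (grid : List (List Int)) (rows cols : Int) (f : Nat) (r c : Int) :
    pvPr grid rows cols (f + 1) r c =
      (if pvAt grid r c = 9 then 1
       else (pvDirs.map (fun d =>
        if 0 ≤ r + d.1 ∧ r + d.1 < rows ∧ 0 ≤ c + d.2 ∧ c + d.2 < cols ∧
            pvAt grid (r + d.1) (c + d.2) = pvAt grid r c + 1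
        then pvPr grid rows cols f (r + d.1) (c + d.2) else 0)).sum) := rfl

lemma pvPr_stable (grid : List (List Int)) (rows cols : Int) :
    ∀ (f1 f2 : Nat) (r c : Int), 0 ≤ pvAt grid r c → pvAt grid r c ≤ 9 →
      (10 - pvAt grid r c).toNat ≤ f1 → (10 - pvAt grid r c).toNat ≤ f2 →
      pvPr grid rows cols f1 r c = pvPr grid rows cols f2 r c := by
  intro f1
  induction f1 with
  | zero => intro f2 r c h0 h9 hf1 hf2; omega
  | succ f1 ih =>
    intro f2 r c h0 h9 hf1 hf2
    cases f2 with
    | zero => omega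
    | succ f2 =>
      by_cases h9' : pvAt grid r c = 9
      · simp [pvPr, h9']
      · simp only [pvPr, if_neg h9']
        congr 1
        apply List.map_congr_left
        intro d hd
        by_cases hc : (0 ≤ r + d.1 ∧ r + d.1 < rows ∧ 0 ≤ c + d.2 ∧ c + d.2 < cols ∧
            pvAt grid (r + d.1) (c + d.2) = pvAt grid r c + 1)
        · rw [if_pos hc, if_pos hc]
          obtain ⟨-, -, -, -, hval⟩ := hc
          exact ih f2 _ _ (by omega) (by omega) (by omega) (by omega)
        · rw [if_neg hc, if_neg hc]

lemma pvPR_nine (grid : List (List Int)) (rows cols : Int) (r c : Int)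
    (h : pvAt grid r c = 9) : pvPR grid rows cols r c = 1 := by
  unfold pvPR
  rw [show (10 : Nat) = 9 + 1 from rfl]
  simp [pvPr, h]

lemma pvSumContrib (grid : List (List Int)) (rows cols : Int) (r c : Int)
    (h0 : 0 ≤ pvAt grid r c) (h8 : pvAt grid r c ≤ 8) :
    (pvDirs.map (fun d =>
      if 0 ≤ r + d.1 ∧ r + d.1 < rows ∧ 0 ≤ c + d.2 ∧ c + d.2 < cols ∧
          pvAt grid (r + d.1) (c + d.2) = pvAt grid r c + 1
      then pvPR grid rows cols (r + d.1) (c + d.2) else 0)).sum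
      = pvPR grid rows cols r c := by
  have h9' : pvAt grid r c ≠ 9 := by omega
  have h1 : pvPR grid rows cols r c =
      (if pvAt grid r c = 9 then 1
       else (pvDirs.map (fun d =>
        if 0 ≤ r + d.1 ∧ r + d.1 < rows ∧ 0 ≤ c + d.2 ∧ c + d.2 < cols ∧
            pvAt grid (r + d.1) (c + d.2) = pvAt grid r c + 1
        then pvPr grid rows cols 9 (r + d.1) (c + d.2) else 0)).sum) :=
    pvPr_succ grid rows cols 9 r c
  rw [h1, if_neg h9']
  refine congrArg List.sum (List.map_congr_left ?_)
  intro d hd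
  by_cases hc : (0 ≤ r + d.1 ∧ r + d.1 < rows ∧ 0 ≤ c + d.2 ∧ c + d.2 < cols ∧
      pvAt grid (r + d.1) (c + d.2) = pvAt grid r c + 1)
  · rw [if_pos hc, if_pos hc]
    obtain ⟨-, -, -, -, hval⟩ := hc
    exact pvPr_stable grid rows cols 10 9 _ _ (by omega) (by omega) (by omega) (by omega)
  · rw [if_neg hc, if_neg hc]

-- invariant on A's memo: every stored value is the reference rating of its cell
def pvInv (grid : List (List Int)) (rows cols : Int)
    (memo : PySem.Dict (Int × Int) Int) : Prop :=
  ∀ r c w, memo.get? (r, c) = some w → w = pvPR grid rows cols r c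

lemma dp_correct (grid : List (List Int)) (rows cols : Int) :
    ∀ (fuel : Nat) (r c : Int) (memo : PySem.Dict (Int × Int) Int),
      pvInv grid rows cols memo →
      0 ≤ pvAt grid r c → pvAt grid r c ≤ 9 →
      (10 - pvAt grid r c).toNat ≤ fuel →
      (dpTrailheadRating grid rows cols fuel r c memo).1 = pvPR grid rows cols r c ∧
        pvInv grid rows cols (dpTrailheadRating grid rows cols fuel r c memo).2 := by
  intro fuel
  induction fuel with
  | zero => intro r c memo hInv h0 h9 hf; omega
  | succ fuel ih =>
    intro r c memo hInv h0 h9 hf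
    by_cases h9' : pvAt grid r c = 9
    · simp only [dpTrailheadRating, if_pos h9']
      exact ⟨(pvPR_nine grid rows cols r c h9').symm, hInv⟩
    · rcases hm : memo.get? (r, c) with _ | w
      · have hfold : ∀ (ds : List (Int × Int)) (acc : Int) (m : PySem.Dict (Int × Int) Int),
            pvInv grid rows cols m →
            ((ds.foldl
              (fun (s : Int × PySem.Dict (Int × Int) Int) d =>
                let rr := r + d.1
                let cc := c + d.2
                if 0 ≤ rr ∧ rr < rows ∧ 0 ≤ cc ∧ cc < cols ∧ pvAt grid rr cc = pvAt grid r c + 1 then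
                  let p := dpTrailheadRating grid rows cols fuel rr cc s.2
                  (s.1 + p.1, p.2)
                else s) (acc, m)).1
              = acc + (ds.map (fun d =>
                  if 0 ≤ r + d.1 ∧ r + d.1 < rows ∧ 0 ≤ c + d.2 ∧ c + d.2 < cols ∧
                      pvAt grid (r + d.1) (c + d.2) = pvAt grid r c + 1
                  then pvPR grid rows cols (r + d.1) (c + d.2) else 0)).sum) ∧
            pvInv grid rows cols ((ds.foldl
              (fun (s : Int × PySem.Dict (Int × Int) Int) d =>
                let rr := r + d.1
                let cc := c + d.2
                if 0 ≤ rr ∧ rr < rows ∧ 0 ≤ cc ∧ cc < cols ∧ pvAt grid rr cc = pvAt grid r c + 1 then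
                  let p := dpTrailheadRating grid rows cols fuel rr cc s.2
                  (s.1 + p.1, p.2)
                else s) (acc, m)).2) := by
          intro ds
          induction ds with
          | nil => intro acc m hm'; exact ⟨by simp, hm'⟩
          | cons d ds ihds =>
            intro acc m hm'
            simp only [List.foldl_cons, List.map_cons, List.sum_cons]
            by_cases hc : (0 ≤ r + d.1 ∧ r + d.1 < rows ∧ 0 ≤ c + d.2 ∧ c + d.2 < cols ∧
                pvAt grid (r + d.1) (c + d.2) = pvAt grid r c + 1)
            · rw [if_pos hc, if_pos hc]
              have hval := hc.2.2.2.2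
              have hrec := ih (r + d.1) (c + d.2) m hm' (by omega) (by omega) (by omega)
              obtain ⟨hA, hB⟩ := ihds (acc + (dpTrailheadRating grid rows cols fuel (r + d.1) (c + d.2) m).1)
                (dpTrailheadRating grid rows cols fuel (r + d.1) (c + d.2) m).2 hrec.2
              refine ⟨?_, hB⟩
              rw [hA, hrec.1]
              ring
            · rw [if_neg hc, if_neg hc]
              obtain ⟨hA, hB⟩ := ihds acc m hm'
              exact ⟨by rw [hA]; ring, hB⟩
        simp only [dpTrailheadRating, if_neg h9', hm]
        obtain ⟨hA, hB⟩ := hfold pvDirs 0 memo hInv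
        have hval : (pvDirs.foldl
              (fun (s : Int × PySem.Dict (Int × Int) Int) d =>
                let rr := r + d.1
                let cc := c + d.2
                if 0 ≤ rr ∧ rr < rows ∧ 0 ≤ cc ∧ cc < cols ∧ pvAt grid rr cc = pvAt grid r c + 1 then
                  let p := dpTrailheadRating grid rows cols fuel rr cc s.2
                  (s.1 + p.1, p.2)
                else s) (0, memo)).1 = pvPR grid rows cols r c := by
          rw [hA, pvSumContrib grid rows cols r c h0 (by omega)]
          ring
        refine ⟨hval, ?_⟩
        intro r' c' w' hw'
        rw [PySem.Dict.get?_insert] at hw'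
        by_cases he : ((r', c') : Int × Int) = (r, c)
        · rw [if_pos he] at hw'
          injection hw' with h'
          injection he with e1 e2
          subst e1; subst e2
          rw [← h', hval]
        · rw [if_neg he] at hw'
          exact hB r' c' w' hw'
      · simp only [dpTrailheadRating, if_neg h9', hm]
        exact ⟨hInv r c w hm, hInv⟩

-- A's double scan as a sum of reference ratings over height-0 cells
lemma solveA_sum (grid : List (List Int)) (rows cols : Int) :
    ∀ (rs : List Int) (t : Int) (m : PySem.Dict (Int × Int) Int),
      pvInv grid rows cols m →
      (rs.foldl
        (fun (st : Int × PySem.Dict (Int × Int) Int) r =>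
          (PySem.List.pyRange 0 cols 1).foldl
            (fun st c =>
              if pvAt grid r c = 0 then
                let p := dpTrailheadRating grid rows cols 10 r c st.2
                (st.1 + p.1, p.2)
              else st) st) (t, m)).1
        = t + (rs.map (fun r => ((PySem.List.pyRange 0 cols 1).map (fun c =>
            if pvAt grid r c = 0 then pvPR grid rows cols r c else 0)).sum)).sum ∧
      pvInv grid rows cols
        ((rs.foldl
          (fun (st : Int × PySem.Dict (Int × Int) Int) r =>
            (PySem.List.pyRange 0 cols 1).foldl
              (fun st c =>
                if pvAt grid r c = 0 then
                  let p := dpTrailheadRating grid rows cols 10 r c st.2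
                  (st.1 + p.1, p.2)
                else st) st) (t, m)).2) := by
  have inner : ∀ (r : Int) (cs : List Int) (t : Int) (m : PySem.Dict (Int × Int) Int),
      pvInv grid rows cols m →
      ((cs.foldl
          (fun (st : Int × PySem.Dict (Int × Int) Int) c =>
            if pvAt grid r c = 0 then
              let p := dpTrailheadRating grid rows cols 10 r c st.2
              (st.1 + p.1, p.2)
            else st) (t, m)).1
        = t + (cs.map (fun c => if pvAt grid r c = 0 then pvPR grid rows cols r c else 0)).sum) ∧
      pvInv grid rows cols
        ((cs.foldl
          (fun (st : Int × PySem.Dict (Int × Int) Int) c =>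
            if pvAt grid r c = 0 then
              let p := dpTrailheadRating grid rows cols 10 r c st.2
              (st.1 + p.1, p.2)
            else st) (t, m)).2) := by
    intro r cs
    induction cs with
    | nil => intro t m hm; exact ⟨by simp, hm⟩
    | cons ch cs ihcs =>
      intro t m hm
      simp only [List.foldl_cons, List.map_cons, List.sum_cons]
      by_cases h0c : pvAt grid r ch = 0
      · rw [if_pos h0c, if_pos h0c]
        have hrec := dp_correct grid rows cols 10 r ch m hm (by omega) (by omega) (by omega)
        obtain ⟨hA, hB⟩ := ihcs (t + (dpTrailheadRating grid rows cols 10 r ch m).1)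
          (dpTrailheadRating grid rows cols 10 r ch m).2 hrec.2
        exact ⟨by rw [hA, hrec.1]; ring, hB⟩
      · rw [if_neg h0c, if_neg h0c]
        obtain ⟨hA, hB⟩ := ihcs t m hm
        exact ⟨by rw [hA]; ring, hB⟩
  intro rs
  induction rs with
  | nil => intro t m hm; exact ⟨by simp, hm⟩
  | cons rh rs ihrs =>
    intro t m hm
    simp only [List.foldl_cons, List.map_cons, List.sum_cons]
    obtain ⟨hA, hB⟩ := inner rh (PySem.List.pyRange 0 cols 1) t m hm
    rcases hfc : ((PySem.List.pyRange 0 cols 1).foldl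
        (fun (st : Int × PySem.Dict (Int × Int) Int) c =>
          if pvAt grid rh c = 0 then
            let p := dpTrailheadRating grid rows cols 10 rh c st.2
            (st.1 + p.1, p.2)
          else st) (t, m)) with ⟨t1, m1⟩
    rw [hfc] at hA hB
    obtain ⟨hA2, hB2⟩ := ihrs t1 m1 hB
    constructor
    · rw [hA2]
      simp only at hA
      rw [hA]
      ring
    · exact hB2

-- B-side table invariant: every in-bounds cell of height in [b, 9] is rated with its reference rating
def pvJ (grid : List (List Int)) (rows cols : Int) (b : Int)
    (d : PySem.Dict (Int × Int) Int) : Prop :=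
  ∀ r c, 0 ≤ r → r < rows → 0 ≤ c → c < cols → b ≤ pvAt grid r c → pvAt grid r c ≤ 9 →
    d.get? (r, c) = some (pvPR grid rows cols r c)

lemma initCol (grid : List (List Int)) :
    ∀ (cs : List Int) (d : PySem.Dict (Int × Int) Int) (r : Int),
      (∀ p, d.get? p = some 1 →
        (cs.foldl (fun d c => if pvAt grid r c = 9 then d.insert (r, c) 1 else d) d).get? p = some 1) ∧
      (∀ c ∈ cs, pvAt grid r c = 9 →
        (cs.foldl (fun d c => if pvAt grid r c = 9 then d.insert (r, c) 1 else d) d).get? (r, c) = some 1) := by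
  intro cs
  induction cs with
  | nil => intro d r; exact ⟨fun p hp => hp, fun c hc => absurd hc (List.not_mem_nil)⟩
  | cons ch cs ihcs =>
    intro d r
    simp only [List.foldl_cons]
    by_cases h9 : pvAt grid r ch = 9
    · rw [if_pos h9]
      refine ⟨?_, ?_⟩
      · intro p hp
        apply (ihcs (d.insert (r, ch) 1) r).1
        rw [PySem.Dict.get?_insert]
        split
        · rfl
        · exact hp
      · intro c hc h9c
        rcases List.mem_cons.mp hc with rfl | hc'
        · apply (ihcs (d.insert (r, c) 1) r).1
          rw [PySem.Dict.get?_insert, if_pos rfl]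
        · exact (ihcs (d.insert (r, ch) 1) r).2 c hc' h9c
    · rw [if_neg h9]
      refine ⟨(ihcs d r).1, ?_⟩
      intro c hc h9c
      rcases List.mem_cons.mp hc with rfl | hc'
      · exact absurd h9c h9
      · exact (ihcs d r).2 c hc' h9c

lemma initRow (grid : List (List Int)) (cols : Int) :
    ∀ (rs : List Int) (d : PySem.Dict (Int × Int) Int),
      (∀ p, d.get? p = some 1 →
        (rs.foldl (fun d r => (PySem.List.pyRange 0 cols 1).foldl
            (fun d c => if pvAt grid r c = 9 then d.insert (r, c) 1 else d) d) d).get? p = some 1) ∧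
      (∀ r ∈ rs, ∀ c, 0 ≤ c → c < cols → pvAt grid r c = 9 →
        (rs.foldl (fun d r => (PySem.List.pyRange 0 cols 1).foldl
            (fun d c => if pvAt grid r c = 9 then d.insert (r, c) 1 else d) d) d).get? (r, c) = some 1) := by
  intro rs
  induction rs with
  | nil => intro d; exact ⟨fun p hp => hp, fun r hr => absurd hr (List.not_mem_nil)⟩
  | cons rh rs ihrs =>
    intro d
    simp only [List.foldl_cons]
    set d1 := (PySem.List.pyRange 0 cols 1).foldl
        (fun d c => if pvAt grid rh c = 9 then d.insert (rh, c) 1 else d) d with hd1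
    refine ⟨?_, ?_⟩
    · intro p hp
      exact (ihrs d1).1 p ((initCol grid (PySem.List.pyRange 0 cols 1) d rh).1 p hp)
    · intro r hr c hc0 hc1 h9c
      rcases List.mem_cons.mp hr with rfl | hr'
      · apply (ihrs d1).1
        exact (initCol grid (PySem.List.pyRange 0 cols 1) d r).2 c
          (PySem.List.mem_pyRange_one.mpr ⟨hc0, hc1⟩) h9c
      · exact (ihrs d1).2 r hr' c hc0 hc1 h9c

lemma passCol (grid : List (List Int)) (rows cols : Int) (v : Int)
    (hv0 : 0 ≤ v) (hv8 : v ≤ 8) (r : Int) :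
    ∀ (cs : List Int) (d : PySem.Dict (Int × Int) Int),
      pvJ grid rows cols (v + 1) d →
      (∀ r' c', d.get? (r', c') = some (pvPR grid rows cols r' c') →
        (cs.foldl (fun d c =>
          if pvAt grid r c = v then
            d.insert (r, c)
              (pvDirs.foldl
                (fun (s : Int) dd =>
                  let rr := r + dd.1
                  let cc := c + dd.2
                  if 0 ≤ rr ∧ rr < rows ∧ 0 ≤ cc ∧ cc < cols ∧ pvAt grid rr cc = v + 1 then
                    s + d.getD (rr, cc) 0
                  else s) 0)
          else d) d).get? (r', c') = some (pvPR grid rows cols r' c')) ∧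
      (∀ c ∈ cs, pvAt grid r c = v →
        (cs.foldl (fun d c =>
          if pvAt grid r c = v then
            d.insert (r, c)
              (pvDirs.foldl
                (fun (s : Int) dd =>
                  let rr := r + dd.1
                  let cc := c + dd.2
                  if 0 ≤ rr ∧ rr < rows ∧ 0 ≤ cc ∧ cc < cols ∧ pvAt grid rr cc = v + 1 then
                    s + d.getD (rr, cc) 0
                  else s) 0)
          else d) d).get? (r, c) = some (pvPR grid rows cols r c)) := by
  intro cs
  induction cs with
  | nil =>
    intro d hJd
    exact ⟨fun r' c' h => h, fun c hc => absurd hc (List.not_mem_nil)⟩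
  | cons ch cs ihcs =>
    intro d hJd
    simp only [List.foldl_cons]
    by_cases hch : pvAt grid r ch = v
    · rw [if_pos hch]
      have hS : (pvDirs.foldl
          (fun (s : Int) dd =>
            let rr := r + dd.1
            let cc := ch + dd.2
            if 0 ≤ rr ∧ rr < rows ∧ 0 ≤ cc ∧ cc < cols ∧ pvAt grid rr cc = v + 1 then
              s + d.getD (rr, cc) 0
            else s) 0) = pvPR grid rows cols r ch := by
        rw [PySem.List.foldl_congr_mem pvDirs _
          (fun (s : Int) dd => s +
            (if 0 ≤ r + dd.1 ∧ r + dd.1 < rows ∧ 0 ≤ ch + dd.2 ∧ ch + dd.2 < cols ∧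
                pvAt grid (r + dd.1) (ch + dd.2) = v + 1
             then pvPR grid rows cols (r + dd.1) (ch + dd.2) else 0)) 0 ?_]
        · rw [PySem.List.foldl_add]
          have hsc := pvSumContrib grid rows cols r ch (by omega) (by omega)
          rw [hch] at hsc
          rw [hsc]
          ring
        · intro a dd _
          by_cases hc : (0 ≤ r + dd.1 ∧ r + dd.1 < rows ∧ 0 ≤ ch + dd.2 ∧ ch + dd.2 < cols ∧
              pvAt grid (r + dd.1) (ch + dd.2) = v + 1)
          · simp only [if_pos hc]
            obtain ⟨hb1, hb2, hb3, hb4, hbv⟩ := hc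
            rw [PySem.Dict.getD_of_get?_eq_some d 0
              (hJd (r + dd.1) (ch + dd.2) hb1 hb2 hb3 hb4 (by omega) (by omega))]
          · simp only [if_neg hc]
            ring
      set d1 := d.insert (r, ch) (pvDirs.foldl
          (fun (s : Int) dd =>
            let rr := r + dd.1
            let cc := ch + dd.2
            if 0 ≤ rr ∧ rr < rows ∧ 0 ≤ cc ∧ cc < cols ∧ pvAt grid rr cc = v + 1 then
              s + d.getD (rr, cc) 0
            else s) 0) with hd1
      have hJd1 : pvJ grid rows cols (v + 1) d1 := by
        intro r' c' hr0 hr1 hc0 hc1 hlo hhi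
        rw [hd1, PySem.Dict.get?_insert]
        split
        · next he =>
          injection he with e1 e2
          subst e1; subst e2
          omega
        · exact hJd r' c' hr0 hr1 hc0 hc1 hlo hhi
      have hpres1 : ∀ r' c', d.get? (r', c') = some (pvPR grid rows cols r' c') →
          d1.get? (r', c') = some (pvPR grid rows cols r' c') := by
        intro r' c' h
        rw [hd1, PySem.Dict.get?_insert]
        split
        · next he =>
          injection he with e1 e2
          subst e1; subst e2
          rw [hS]
        · exact h
      obtain ⟨hpres2, hnew2⟩ := ihcs d1 hJd1
      refine ⟨fun r' c' h => hpres2 r' c' (hpres1 r' c' h), ?_⟩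
      intro cc hcc hvc
      rcases List.mem_cons.mp hcc with rfl | hcc'
      · apply hpres2
        rw [hd1, PySem.Dict.get?_insert, if_pos rfl, hS]
      · exact hnew2 cc hcc' hvc
    · rw [if_neg hch]
      obtain ⟨hpres2, hnew2⟩ := ihcs d hJd
      refine ⟨hpres2, ?_⟩
      intro cc hcc hvc
      rcases List.mem_cons.mp hcc with rfl | hcc'
      · exact absurd hvc hch
      · exact hnew2 cc hcc' hvc

lemma passStep (grid : List (List Int)) (rows cols : Int) (v : Int)
    (hv0 : 0 ≤ v) (hv8 : v ≤ 8) (d : PySem.Dict (Int × Int) Int)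
    (hJ : pvJ grid rows cols (v + 1) d) :
    pvJ grid rows cols v
      ((PySem.List.pyRange 0 rows 1).foldl
        (fun d r =>
          (PySem.List.pyRange 0 cols 1).foldl
            (fun d c =>
              if pvAt grid r c = v then
                d.insert (r, c)
                  (pvDirs.foldl
                    (fun (s : Int) dd =>
                      let rr := r + dd.1
                      let cc := c + dd.2
                      if 0 ≤ rr ∧ rr < rows ∧ 0 ≤ cc ∧ cc < cols ∧ pvAt grid rr cc = v + 1 then
                        s + d.getD (rr, cc) 0
                      else s) 0)
              else d) d) d) := by
  have hrow : ∀ (rs : List Int) (d : PySem.Dict (Int × Int) Int),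
      pvJ grid rows cols (v + 1) d →
      (∀ r' c', d.get? (r', c') = some (pvPR grid rows cols r' c') →
        (rs.foldl
          (fun d r =>
            (PySem.List.pyRange 0 cols 1).foldl
              (fun d c =>
                if pvAt grid r c = v then
                  d.insert (r, c)
                    (pvDirs.foldl
                      (fun (s : Int) dd =>
                        let rr := r + dd.1
                        let cc := c + dd.2
                        if 0 ≤ rr ∧ rr < rows ∧ 0 ≤ cc ∧ cc < cols ∧ pvAt grid rr cc = v + 1 then
                          s + d.getD (rr, cc) 0
                        else s) 0)
                else d) d) d).get? (r', c') = some (pvPR grid rows cols r' c')) ∧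
      (∀ r ∈ rs, ∀ c, 0 ≤ c → c < cols → pvAt grid r c = v →
        (rs.foldl
          (fun d r =>
            (PySem.List.pyRange 0 cols 1).foldl
              (fun d c =>
                if pvAt grid r c = v then
                  d.insert (r, c)
                    (pvDirs.foldl
                      (fun (s : Int) dd =>
                        let rr := r + dd.1
                        let cc := c + dd.2
                        if 0 ≤ rr ∧ rr < rows ∧ 0 ≤ cc ∧ cc < cols ∧ pvAt grid rr cc = v + 1 then
                          s + d.getD (rr, cc) 0
                        else s) 0)
                else d) d) d).get? (r, c) = some (pvPR grid rows cols r c)) := by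
    intro rs
    induction rs with
    | nil => intro d hJd; exact ⟨fun r' c' h => h, fun r hr => absurd hr (List.not_mem_nil)⟩
    | cons rh rs ihrs =>
      intro d hJd
      simp only [List.foldl_cons]
      obtain ⟨pc1, pc2⟩ := passCol grid rows cols v hv0 hv8 rh (PySem.List.pyRange 0 cols 1) d hJd
      set d1 := (PySem.List.pyRange 0 cols 1).foldl
          (fun d c =>
            if pvAt grid rh c = v then
              d.insert (rh, c)
                (pvDirs.foldl
                  (fun (s : Int) dd =>
                    let rr := rh + dd.1
                    let cc := c + dd.2
                    if 0 ≤ rr ∧ rr < rows ∧ 0 ≤ cc ∧ cc < cols ∧ pvAt grid rr cc = v + 1 then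
                      s + d.getD (rr, cc) 0
                    else s) 0)
            else d) d with hd1
      have hJd1 : pvJ grid rows cols (v + 1) d1 := by
        intro r' c' hr0 hr1 hc0 hc1 hlo hhi
        exact pc1 r' c' (hJd r' c' hr0 hr1 hc0 hc1 hlo hhi)
      obtain ⟨p2, n2⟩ := ihrs d1 hJd1
      refine ⟨fun r' c' h => p2 r' c' (pc1 r' c' h), ?_⟩
      intro r hr cc hc0 hc1 hvc
      rcases List.mem_cons.mp hr with rfl | hr'
      · exact p2 r cc (pc2 cc (PySem.List.mem_pyRange_one.mpr ⟨hc0, hc1⟩) hvc)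
      · exact n2 r hr' cc hc0 hc1 hvc
  intro r c hr0 hr1 hc0 hc1 hlo hhi
  by_cases hvv : pvAt grid r c = v
  · exact (hrow (PySem.List.pyRange 0 rows 1) d hJ).2 r
      (PySem.List.mem_pyRange_one.mpr ⟨hr0, hr1⟩) c hc0 hc1 hvv
  · exact (hrow (PySem.List.pyRange 0 rows 1) d hJ).1 r c
      (hJ r c hr0 hr1 hc0 hc1 (by omega) hhi)

-- B's final scan as the same sum of reference ratings over height-0 cells
lemma solveB_sum (grid : List (List Int)) (rows cols : Int)
    (rating : PySem.Dict (Int × Int) Int) (hJ : pvJ grid rows cols 0 rating) :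
    ∀ (rs : List Int), (∀ r ∈ rs, 0 ≤ r ∧ r < rows) → ∀ (t : Int),
      (rs.foldl
        (fun (t : Int) r =>
          (PySem.List.pyRange 0 cols 1).foldl
            (fun t c => if pvAt grid r c = 0 then t + rating.getD (r, c) 0 else t) t) t)
        = t + (rs.map (fun r => ((PySem.List.pyRange 0 cols 1).map (fun c =>
            if pvAt grid r c = 0 then pvPR grid rows cols r c else 0)).sum)).sum := by
  have inner : ∀ (r : Int), 0 ≤ r → r < rows → ∀ (t : Int),
      ((PySem.List.pyRange 0 cols 1).foldl
        (fun t c => if pvAt grid r c = 0 then t + rating.getD (r, c) 0 else t) t)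
        = t + ((PySem.List.pyRange 0 cols 1).map (fun c =>
            if pvAt grid r c = 0 then pvPR grid rows cols r c else 0)).sum := by
    intro r hr0 hr1 t
    rw [PySem.List.foldl_congr_mem _ _
      (fun (t : Int) c => t + (if pvAt grid r c = 0 then pvPR grid rows cols r c else 0)) t ?_]
    · exact PySem.List.foldl_add _ _ t
    · intro a x hx
      by_cases h0 : pvAt grid r x = 0
      · simp only [if_pos h0]
        obtain ⟨hx0, hx1⟩ := PySem.List.mem_pyRange_one.mp hx
        rw [PySem.Dict.getD_of_get?_eq_some rating 0 (hJ r x hr0 hr1 hx0 hx1 (by omega) (by omega))]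
      · simp only [if_neg h0]
        ring
  intro rs
  induction rs with
  | nil => intro hb t; simp
  | cons rh rs ihrs =>
    intro hb t
    simp only [List.foldl_cons, List.map_cons, List.sum_cons]
    obtain ⟨hr0, hr1⟩ := hb rh List.mem_cons_self
    rw [inner rh hr0 hr1 t, ihrs (fun r hr => hb r (List.mem_cons_of_mem rh hr))]
    ring

-- ===== VERDICT (by name: the statement is the Claim_ definition above) =====
theorem solve_spec : Claim_equal_solve := by
  intro grid _ _
  show solve grid = solve_alt grid
  unfold solve solve_alt
  set rows : Int := (grid.length : Int) with hrows
  set cols : Int := ((PySem.List.pyGetD grid 0 []).length : Int) with hcols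
  -- A side
  have hInvE : pvInv grid rows cols PySem.Dict.empty := by
    intro r c w h
    simp [PySem.Dict.get?_empty] at h
  obtain ⟨hA, -⟩ := solveA_sum grid rows cols (PySem.List.pyRange 0 rows 1) 0 PySem.Dict.empty hInvE
  rw [hA]
  -- B side
  obtain ⟨-, hInit⟩ := initRow grid cols (PySem.List.pyRange 0 rows 1) PySem.Dict.empty
  have hJ9 : pvJ grid rows cols 9
      ((PySem.List.pyRange 0 rows 1).foldl
        (fun d r => (PySem.List.pyRange 0 cols 1).foldl
          (fun d c => if pvAt grid r c = 9 then d.insert (r, c) 1 else d) d)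
        PySem.Dict.empty) := by
    intro r c hr0 hr1 hc0 hc1 hlo hhi
    have h9 : pvAt grid r c = 9 := by omega
    rw [pvPR_nine grid rows cols r c h9]
    exact hInit r (PySem.List.mem_pyRange_one.mpr ⟨hr0, hr1⟩) c hc0 hc1 h9
  have hrange : PySem.List.pyRange 8 (-1) (-1) = [8, 7, 6, 5, 4, 3, 2, 1, 0] := by decide
  rw [hrange]
  simp only [List.foldl_cons, List.foldl_nil]
  have hBJ := passStep grid rows cols 0 (by norm_num) (by norm_num) _
    (passStep grid rows cols 1 (by norm_num) (by norm_num) _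
      (passStep grid rows cols 2 (by norm_num) (by norm_num) _
        (passStep grid rows cols 3 (by norm_num) (by norm_num) _
          (passStep grid rows cols 4 (by norm_num) (by norm_num) _
            (passStep grid rows cols 5 (by norm_num) (by norm_num) _
              (passStep grid rows cols 6 (by norm_num) (by norm_num) _
                (passStep grid rows cols 7 (by norm_num) (by norm_num) _
                  (passStep grid rows cols 8 (by norm_num) (by norm_num) _
                    (by exact hJ9)))))))))
  rw [solveB_sum grid rows cols _ (by exact hBJ) (PySem.List.pyRange 0 rows 1)
    (fun r hr => PySem.List.mem_pyRange_one.mp hr) 0]
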